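-- pv_equiv track=rewrite | github.com/jay-acosta/blis-code-generator | level4_gen/arch_util.py | convert_obj_to_name
-- ===== SOURCE A (Python) =====
-- def convert_obj_to_name(o_types):
-- 	scalars = ["alpha", "beta", "gamma", "delta"]
-- 	vectors = ["x", "y", "z"]
-- 	matrix  = ["a", "b", "c", "d", "e", "f", "g", "h"]
--
-- 	s_idx, v_idx, m_idx = 0, 0, 0
--
-- 	names = []
--
-- 	for name in o_types:
-- 		if name == "s":
-- 			names += [scalars[s_idx]]
-- 			s_idx += 1
-- 		elif name == "v":
-- 			names += [vectors[v_idx]]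
-- 			v_idx += 1
-- 		else:
-- 			names += [matrix[m_idx]]
-- 			m_idx += 1
--
-- 	return names
-- ===== SOURCE B (Python) =====
-- def convert_obj_to_name(o_types):
--     table = {
--         "s": ["alpha", "beta", "gamma", "delta"],
--         "v": ["x", "y", "z"],
--         "m": ["a", "b", "c", "d", "e", "f", "g", "h"],
--     }
--     cats = [t if t in ("s", "v") else "m" for t in o_types]
--     return [table[c][cats[:i].count(c)] for i, c in enumerate(cats)]
-- ===== Notes on version B (the rewrite author's own statement) =====
-- stated objective: alternative
-- what changed: Replaced the running per-category counters with a stateless per-element formula: each position's name is its category's name list indexed by the count of that category in the prefix before it, computed via a category map and prefix counts.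
import Mathlib
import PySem

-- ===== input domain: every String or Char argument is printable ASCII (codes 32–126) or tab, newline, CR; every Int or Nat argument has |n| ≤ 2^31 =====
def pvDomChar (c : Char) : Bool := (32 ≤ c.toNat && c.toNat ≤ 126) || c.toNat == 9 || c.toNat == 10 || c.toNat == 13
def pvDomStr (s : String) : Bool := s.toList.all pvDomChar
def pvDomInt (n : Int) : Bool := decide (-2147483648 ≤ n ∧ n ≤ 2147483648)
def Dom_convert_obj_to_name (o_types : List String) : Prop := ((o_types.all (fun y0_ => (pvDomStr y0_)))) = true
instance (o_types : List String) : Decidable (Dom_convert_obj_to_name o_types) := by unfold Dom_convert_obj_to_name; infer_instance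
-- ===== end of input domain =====

-- B replaces A's running per-category counters by a stateless per-element formula
-- (name = category's list indexed by the category's count in the preceding prefix): an alternative decomposition, not faster.


-- ===== PORT A =====
-- literal port of A: one foldl carrying (s_idx, v_idx, m_idx, names); list indexing uses getD,
-- which is exact inside Pre_ (Python raises IndexError exactly outside Pre_).
def convert_obj_to_name (o_types : List String) : List String :=
  (o_types.foldl (fun (st : Nat × Nat × Nat × List String) name =>
      if name = "s" then (st.1 + 1, st.2.1, st.2.2.1, st.2.2.2 ++ [["alpha","beta","gamma","delta"].getD st.1 ""])
      else if name = "v" then (st.1, st.2.1 + 1, st.2.2.1, st.2.2.2 ++ [["x","y","z"].getD st.2.1 ""])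
      else (st.1, st.2.1, st.2.2.1 + 1, st.2.2.2 ++ [["a","b","c","d","e","f","g","h"].getD st.2.2.1 ""]))
    (0, 0, 0, [])).2.2.2

-- ===== PORT B =====
def pvTable (c : String) : List String :=
  if c = "s" then ["alpha","beta","gamma","delta"]
  else if c = "v" then ["x","y","z"]
  else ["a","b","c","d","e","f","g","h"]

def pvCat (t : String) : String := if t = "s" then "s" else if t = "v" then "v" else "m"

-- literal port of B: category list `cats`, then a map over enumerate taking prefix counts.
def convert_obj_to_name_alt (o_types : List String) : List String :=
  let cats := o_types.map pvCat
  (PySem.List.enumerate cats).map (fun p => (pvTable p.2).getD ((cats.take p.1.toNat).count p.2) "")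

-- ===== PRECONDITION & SPEC =====
-- Pre_ excludes exactly the inputs on which Python A raises IndexError (more than
-- 4 scalars, 3 vectors or 8 matrix codes); both Pythons raise exactly there.
def Pre_convert_obj_to_name (o_types : List String) : Prop :=
  o_types.count "s" ≤ 4 ∧ o_types.count "v" ≤ 3 ∧
  o_types.length - o_types.count "s" - o_types.count "v" ≤ 8
instance (o_types : List String) : Decidable (Pre_convert_obj_to_name o_types) := by
  unfold Pre_convert_obj_to_name; infer_instance

def pvWitness_convert_obj_to_name : List String := ["s", "v", "m", "s", "m"]

def Spec_convert_obj_to_name (o_types : List String) (out : List String) : Prop := out = convert_obj_to_name_alt o_types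
instance (o_types : List String) (out : List String) : Decidable (Spec_convert_obj_to_name o_types out) := by unfold Spec_convert_obj_to_name; infer_instance

-- ===== CLAIM (what is proved, stated in full; the proofs are below) =====
def Claim_equal_convert_obj_to_name : Prop := ∀ (o_types : List String), Dom_convert_obj_to_name o_types → Pre_convert_obj_to_name o_types → Spec_convert_obj_to_name o_types (convert_obj_to_name o_types)

-- ===== LEMMAS AND PROOFS =====

-- B appends one name when its input grows by one element on the right
lemma alt_append (l : List String) (x : String) :
    convert_obj_to_name_alt (l ++ [x]) =
      convert_obj_to_name_alt l ++ [(pvTable (pvCat x)).getD ((l.map pvCat).count (pvCat x)) ""] := by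
  unfold convert_obj_to_name_alt
  simp only [List.map_append, List.map_cons, List.map_nil,
    PySem.List.enumerate_append, List.map_append]
  congr 1
  · refine List.map_congr_left (fun p hp => ?_)
    rcases (PySem.List.mem_enumerate_iff _ _ _).1 hp with ⟨k, hk, rfl⟩
    rw [List.take_append_of_le_length (by simpa using hk.le)]
  · simp [PySem.List.enumerate_cons, List.take_left']

-- invariant: A's fold state is (counts of each category so far, B's output so far)
lemma foldA_eq (l : List String) :
    (l.foldl (fun (st : Nat × Nat × Nat × List String) name =>
      if name = "s" then (st.1 + 1, st.2.1, st.2.2.1, st.2.2.2 ++ [["alpha","beta","gamma","delta"].getD st.1 ""])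
      else if name = "v" then (st.1, st.2.1 + 1, st.2.2.1, st.2.2.2 ++ [["x","y","z"].getD st.2.1 ""])
      else (st.1, st.2.1, st.2.2.1 + 1, st.2.2.2 ++ [["a","b","c","d","e","f","g","h"].getD st.2.2.1 ""]))
      (0, 0, 0, [])) =
    ((l.map pvCat).count "s", (l.map pvCat).count "v", (l.map pvCat).count "m",
      convert_obj_to_name_alt l) := by
  induction l using List.reverseRecOn with
  | nil => rfl
  | append_singleton l x ih =>
    rw [List.foldl_append, ih, alt_append]
    by_cases hs : x = "s"
    · subst hs; simp [pvCat, pvTable, List.count_append]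
    · by_cases hv : x = "v"
      · subst hv; simp [pvCat, pvTable, List.count_append]
      · simp [pvCat, pvTable, hs, hv, List.count_append]

-- ===== VERDICT (by name: the statement is the Claim_ definition above) =====
theorem convert_obj_to_name_spec : Claim_equal_convert_obj_to_name := by
  intro l _ _
  show convert_obj_to_name l = convert_obj_to_name_alt l
  unfold convert_obj_to_name
  rw [foldA_eq]
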